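-- pv_equiv track=rewrite | github.com/2xRon/advent-of-code | python/2019/24_planet_of_discord.py | neighbor_score
-- ===== SOURCE A (Python) =====
-- GRID_SIZE = 5
--
-- def neighbor_score(grid):
--     ns_grid = [[0] * GRID_SIZE for _ in range(GRID_SIZE)]
--     for y in range(GRID_SIZE):
--         for x in range(GRID_SIZE):
--             ns = 0
--             if 0 <= y - 1:
--                 ns += grid[y - 1][x]
--             if y + 1 < GRID_SIZE:
--                 ns += grid[y + 1][x]
--             if 0 <= x - 1:
--                 ns += grid[y][x - 1]
--             if x + 1 < GRID_SIZE:
--                 ns += grid[y][x + 1]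
--
--             ns_grid[y][x] = ns
--     return ns_grid
-- ===== SOURCE B (Python) =====
-- GRID_SIZE = 5
--
-- def _addv(u, v):
--     return [a + b for a, b in zip(u, v)]
--
-- def neighbor_score(grid):
--     # row-wise stencil: each output row is the elementwise sum of the row's
--     # left/right shifts and the rows above and below (zero rows at the borders)
--     zero = [0] * GRID_SIZE
--     rows = [[grid[y][x] for x in range(GRID_SIZE)] for y in range(GRID_SIZE)]
--     above = [zero] + rows[:-1]
--     below = rows[1:] + [zero]
--     return [_addv(_addv(r[1:] + [0], [0] + r[:-1]), _addv(u, d))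
--             for r, u, d in zip(rows, above, below)]
-- ===== Notes on version B (the rewrite author's own statement) =====
-- stated objective: alternative
-- what changed: Replaces the per-cell double loop that gathers each cell's four neighbours into a mutated accumulator grid by a vectorized row-wise stencil: each output row is built in one expression as the elementwise sum of the row shifted left, the row shifted right, and the rows above and below (zero rows at the borders).
import Mathlib
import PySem

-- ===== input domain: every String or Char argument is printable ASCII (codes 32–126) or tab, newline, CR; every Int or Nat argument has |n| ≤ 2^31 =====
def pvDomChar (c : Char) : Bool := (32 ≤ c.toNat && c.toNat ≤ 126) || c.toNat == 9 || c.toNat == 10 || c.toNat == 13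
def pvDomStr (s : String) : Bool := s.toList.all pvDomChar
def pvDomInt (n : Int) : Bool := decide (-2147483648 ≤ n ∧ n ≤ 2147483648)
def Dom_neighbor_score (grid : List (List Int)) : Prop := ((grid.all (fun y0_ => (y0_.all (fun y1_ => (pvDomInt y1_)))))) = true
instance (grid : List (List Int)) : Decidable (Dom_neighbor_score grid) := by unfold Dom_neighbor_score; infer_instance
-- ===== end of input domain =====

-- B replaces A's per-cell gather loop by a row-wise stencil: each output row is the
-- elementwise sum of the row's left/right shifts and the rows above and below.

-- ===== PORT A =====
-- grid[y][x]: exact under Pre_neighbor_score (every index both programs use is in range and nonnegative)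
def pvCell (grid : List (List Int)) (y x : Int) : Int :=
  PySem.List.pyGetD (PySem.List.pyGetD grid y []) x 0

-- A's loop body for one (y,x): ns = 0; four conditional gathers; ns_grid[y][x] = ns
def pvStepA (grid ns : List (List Int)) (y x : Int) : List (List Int) :=
  let ns1 : Int := 0
  let ns1 := if (0:Int) ≤ y - 1 then ns1 + pvCell grid (y-1) x else ns1
  let ns1 := if y + 1 < 5 then ns1 + pvCell grid (y+1) x else ns1
  let ns1 := if (0:Int) ≤ x - 1 then ns1 + pvCell grid y (x-1) else ns1
  let ns1 := if x + 1 < 5 then ns1 + pvCell grid y (x+1) else ns1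
  PySem.List.pySetD ns y (PySem.List.pySetD (PySem.List.pyGetD ns y []) x ns1)

def neighbor_score (grid : List (List Int)) : List (List Int) :=
  let ns0 : List (List Int) := (List.range 5).map (fun _ => List.replicate 5 (0 : Int))
  (PySem.List.pyRange 0 5 1).foldl (fun ns y =>
    (PySem.List.pyRange 0 5 1).foldl (fun ns x => pvStepA grid ns y x) ns) ns0

-- ===== PORT B =====
-- elementwise vector addition (Source B's _addv)
def pvAddv (u v : List Int) : List Int := List.zipWith (· + ·) u v

def neighbor_score_alt (grid : List (List Int)) : List (List Int) :=
  let zero : List Int := List.replicate 5 (0 : Int)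
  let rows := (PySem.List.pyRange 0 5 1).map (fun y =>
    (PySem.List.pyRange 0 5 1).map (fun x =>
      PySem.List.pyGetD (PySem.List.pyGetD grid y []) x 0))
  let above := [zero] ++ rows.dropLast
  let below := rows.drop 1 ++ [zero]
  (rows.zip (above.zip below)).map (fun p =>
    pvAddv (pvAddv (PySem.List.slice p.1 (some 1) none ++ [(0 : Int)])
                   ([(0 : Int)] ++ PySem.List.slice p.1 none (some (-1))))
           (pvAddv p.2.1 p.2.2))

-- ===== PRECONDITION & SPEC =====
-- Pre_: A indexes grid[0..4][0..4]; with fewer than 5 rows, or fewer than 5 entries in one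
-- of the first 5 rows, the Python A raises IndexError.
def Pre_neighbor_score (grid : List (List Int)) : Prop :=
  5 ≤ grid.length ∧ ∀ r ∈ grid.take 5, 5 ≤ r.length
instance (grid : List (List Int)) : Decidable (Pre_neighbor_score grid) := by
  unfold Pre_neighbor_score; infer_instance
def pvWitness_neighbor_score : List (List Int) :=
  [[0,1,2,3,4],[1,2,3,4,5],[2,3,4,5,6],[3,4,5,6,7],[4,5,6,7,8]]
def Spec_neighbor_score (grid : List (List Int)) (out : List (List Int)) : Prop := out = neighbor_score_alt grid
instance (grid : List (List Int)) (out : List (List Int)) : Decidable (Spec_neighbor_score grid out) := by unfold Spec_neighbor_score; infer_instance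

-- ===== CLAIM (what is proved, stated in full; the proofs are below) =====
def Claim_equal_neighbor_score : Prop := ∀ (grid : List (List Int)), Dom_neighbor_score grid → Pre_neighbor_score grid → Spec_neighbor_score grid (neighbor_score grid)

-- ===== LEMMAS AND PROOFS =====
theorem pvSplit5 {α : Type} (l : List α) (h : 5 ≤ l.length) :
    ∃ a0 a1 a2 a3 a4 t, l = a0::a1::a2::a3::a4::t := by
  rcases l with _|⟨a0,_|⟨a1,_|⟨a2,_|⟨a3,_|⟨a4,t⟩⟩⟩⟩⟩ <;> simp at h
  exact ⟨a0,a1,a2,a3,a4,t,rfl⟩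
theorem pvG0 {α : Type} (a0 : α) (l : List α) (d : α) : PySem.List.pyGetD (a0::l) (0:Int) d = a0 := by
  simp [PySem.List.pyGetD, PySem.List.pyGet?, PySem.List.pyIdx?]
theorem pvS0 {α : Type} (a0 : α) (l : List α) (v : α) : PySem.List.pySetD (a0::l) (0:Int) v = v::l := by
  simp [PySem.List.pySetD, PySem.List.pySet?, PySem.List.pyIdx?]
theorem pvG1 {α : Type} (a0 a1 : α) (l : List α) (d : α) : PySem.List.pyGetD (a0::a1::l) (1:Int) d = a1 := by
  simp [PySem.List.pyGetD, PySem.List.pyGet?, PySem.List.pyIdx?]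
theorem pvS1 {α : Type} (a0 a1 : α) (l : List α) (v : α) : PySem.List.pySetD (a0::a1::l) (1:Int) v = a0::v::l := by
  simp [PySem.List.pySetD, PySem.List.pySet?, PySem.List.pyIdx?]
theorem pvG2 {α : Type} (a0 a1 a2 : α) (l : List α) (d : α) : PySem.List.pyGetD (a0::a1::a2::l) (2:Int) d = a2 := by
  simp [PySem.List.pyGetD, PySem.List.pyGet?, PySem.List.pyIdx?]
  rw [if_pos (by omega)]
  simp
theorem pvS2 {α : Type} (a0 a1 a2 : α) (l : List α) (v : α) : PySem.List.pySetD (a0::a1::a2::l) (2:Int) v = a0::a1::v::l := by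
  simp [PySem.List.pySetD, PySem.List.pySet?, PySem.List.pyIdx?]
  rw [if_pos (by omega)]
  simp
theorem pvG3 {α : Type} (a0 a1 a2 a3 : α) (l : List α) (d : α) : PySem.List.pyGetD (a0::a1::a2::a3::l) (3:Int) d = a3 := by
  simp [PySem.List.pyGetD, PySem.List.pyGet?, PySem.List.pyIdx?]
  rw [if_pos (by omega)]
  simp
theorem pvS3 {α : Type} (a0 a1 a2 a3 : α) (l : List α) (v : α) : PySem.List.pySetD (a0::a1::a2::a3::l) (3:Int) v = a0::a1::a2::v::l := by
  simp [PySem.List.pySetD, PySem.List.pySet?, PySem.List.pyIdx?]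
  rw [if_pos (by omega)]
  simp
theorem pvG4 {α : Type} (a0 a1 a2 a3 a4 : α) (l : List α) (d : α) : PySem.List.pyGetD (a0::a1::a2::a3::a4::l) (4:Int) d = a4 := by
  simp [PySem.List.pyGetD, PySem.List.pyGet?, PySem.List.pyIdx?]
  rw [if_pos (by omega)]
  simp
theorem pvS4 {α : Type} (a0 a1 a2 a3 a4 : α) (l : List α) (v : α) : PySem.List.pySetD (a0::a1::a2::a3::a4::l) (4:Int) v = a0::a1::a2::a3::v::l := by
  simp [PySem.List.pySetD, PySem.List.pySet?, PySem.List.pyIdx?]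
  rw [if_pos (by omega)]
  simp
set_option maxHeartbeats 1000000 in
theorem pvMain (a00 a01 a02 a03 a04 a10 a11 a12 a13 a14 a20 a21 a22 a23 a24 a30 a31 a32 a33 a34 a40 a41 a42 a43 a44 : Int) (t0 t1 t2 t3 t4 : List Int) (rest : List (List Int)) :
    neighbor_score ((a00::a01::a02::a03::a04::t0)::(a10::a11::a12::a13::a14::t1)::(a20::a21::a22::a23::a24::t2)::(a30::a31::a32::a33::a34::t3)::(a40::a41::a42::a43::a44::t4)::rest) = neighbor_score_alt ((a00::a01::a02::a03::a04::t0)::(a10::a11::a12::a13::a14::t1)::(a20::a21::a22::a23::a24::t2)::(a30::a31::a32::a33::a34::t3)::(a40::a41::a42::a43::a44::t4)::rest) := by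
  have hA00 : pvStepA ((a00::a01::a02::a03::a04::t0)::(a10::a11::a12::a13::a14::t1)::(a20::a21::a22::a23::a24::t2)::(a30::a31::a32::a33::a34::t3)::(a40::a41::a42::a43::a44::t4)::rest) ([[0,0,0,0,0],[0,0,0,0,0],[0,0,0,0,0],[0,0,0,0,0],[0,0,0,0,0]]) 0 0 = ([[a10 + a01,0,0,0,0],[0,0,0,0,0],[0,0,0,0,0],[0,0,0,0,0],[0,0,0,0,0]]) := by
    simp [pvStepA, pvCell, pvG0, pvG1, pvG2, pvG3, pvG4, pvS0, pvS1, pvS2, pvS3, pvS4]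
  have hA01 : pvStepA ((a00::a01::a02::a03::a04::t0)::(a10::a11::a12::a13::a14::t1)::(a20::a21::a22::a23::a24::t2)::(a30::a31::a32::a33::a34::t3)::(a40::a41::a42::a43::a44::t4)::rest) ([[a10 + a01,0,0,0,0],[0,0,0,0,0],[0,0,0,0,0],[0,0,0,0,0],[0,0,0,0,0]]) 0 1 = ([[a10 + a01,a11 + a00 + a02,0,0,0],[0,0,0,0,0],[0,0,0,0,0],[0,0,0,0,0],[0,0,0,0,0]]) := by
    simp [pvStepA, pvCell, pvG0, pvG1, pvG2, pvG3, pvG4, pvS0, pvS1, pvS2, pvS3, pvS4]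
  have hA02 : pvStepA ((a00::a01::a02::a03::a04::t0)::(a10::a11::a12::a13::a14::t1)::(a20::a21::a22::a23::a24::t2)::(a30::a31::a32::a33::a34::t3)::(a40::a41::a42::a43::a44::t4)::rest) ([[a10 + a01,a11 + a00 + a02,0,0,0],[0,0,0,0,0],[0,0,0,0,0],[0,0,0,0,0],[0,0,0,0,0]]) 0 2 = ([[a10 + a01,a11 + a00 + a02,a12 + a01 + a03,0,0],[0,0,0,0,0],[0,0,0,0,0],[0,0,0,0,0],[0,0,0,0,0]]) := by
    simp [pvStepA, pvCell, pvG0, pvG1, pvG2, pvG3, pvG4, pvS0, pvS1, pvS2, pvS3, pvS4]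
  have hA03 : pvStepA ((a00::a01::a02::a03::a04::t0)::(a10::a11::a12::a13::a14::t1)::(a20::a21::a22::a23::a24::t2)::(a30::a31::a32::a33::a34::t3)::(a40::a41::a42::a43::a44::t4)::rest) ([[a10 + a01,a11 + a00 + a02,a12 + a01 + a03,0,0],[0,0,0,0,0],[0,0,0,0,0],[0,0,0,0,0],[0,0,0,0,0]]) 0 3 = ([[a10 + a01,a11 + a00 + a02,a12 + a01 + a03,a13 + a02 + a04,0],[0,0,0,0,0],[0,0,0,0,0],[0,0,0,0,0],[0,0,0,0,0]]) := by
    simp [pvStepA, pvCell, pvG0, pvG1, pvG2, pvG3, pvG4, pvS0, pvS1, pvS2, pvS3, pvS4]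
  have hA04 : pvStepA ((a00::a01::a02::a03::a04::t0)::(a10::a11::a12::a13::a14::t1)::(a20::a21::a22::a23::a24::t2)::(a30::a31::a32::a33::a34::t3)::(a40::a41::a42::a43::a44::t4)::rest) ([[a10 + a01,a11 + a00 + a02,a12 + a01 + a03,a13 + a02 + a04,0],[0,0,0,0,0],[0,0,0,0,0],[0,0,0,0,0],[0,0,0,0,0]]) 0 4 = ([[a10 + a01,a11 + a00 + a02,a12 + a01 + a03,a13 + a02 + a04,a14 + a03],[0,0,0,0,0],[0,0,0,0,0],[0,0,0,0,0],[0,0,0,0,0]]) := by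
    simp [pvStepA, pvCell, pvG0, pvG1, pvG2, pvG3, pvG4, pvS0, pvS1, pvS2, pvS3, pvS4]
  have hA10 : pvStepA ((a00::a01::a02::a03::a04::t0)::(a10::a11::a12::a13::a14::t1)::(a20::a21::a22::a23::a24::t2)::(a30::a31::a32::a33::a34::t3)::(a40::a41::a42::a43::a44::t4)::rest) ([[a10 + a01,a11 + a00 + a02,a12 + a01 + a03,a13 + a02 + a04,a14 + a03],[0,0,0,0,0],[0,0,0,0,0],[0,0,0,0,0],[0,0,0,0,0]]) 1 0 = ([[a10 + a01,a11 + a00 + a02,a12 + a01 + a03,a13 + a02 + a04,a14 + a03],[a00 + a20 + a11,0,0,0,0],[0,0,0,0,0],[0,0,0,0,0],[0,0,0,0,0]]) := by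
    simp [pvStepA, pvCell, pvG0, pvG1, pvG2, pvG3, pvG4, pvS0, pvS1, pvS2, pvS3, pvS4]
  have hA11 : pvStepA ((a00::a01::a02::a03::a04::t0)::(a10::a11::a12::a13::a14::t1)::(a20::a21::a22::a23::a24::t2)::(a30::a31::a32::a33::a34::t3)::(a40::a41::a42::a43::a44::t4)::rest) ([[a10 + a01,a11 + a00 + a02,a12 + a01 + a03,a13 + a02 + a04,a14 + a03],[a00 + a20 + a11,0,0,0,0],[0,0,0,0,0],[0,0,0,0,0],[0,0,0,0,0]]) 1 1 = ([[a10 + a01,a11 + a00 + a02,a12 + a01 + a03,a13 + a02 + a04,a14 + a03],[a00 + a20 + a11,a01 + a21 + a10 + a12,0,0,0],[0,0,0,0,0],[0,0,0,0,0],[0,0,0,0,0]]) := by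
    simp [pvStepA, pvCell, pvG0, pvG1, pvG2, pvG3, pvG4, pvS0, pvS1, pvS2, pvS3, pvS4]
  have hA12 : pvStepA ((a00::a01::a02::a03::a04::t0)::(a10::a11::a12::a13::a14::t1)::(a20::a21::a22::a23::a24::t2)::(a30::a31::a32::a33::a34::t3)::(a40::a41::a42::a43::a44::t4)::rest) ([[a10 + a01,a11 + a00 + a02,a12 + a01 + a03,a13 + a02 + a04,a14 + a03],[a00 + a20 + a11,a01 + a21 + a10 + a12,0,0,0],[0,0,0,0,0],[0,0,0,0,0],[0,0,0,0,0]]) 1 2 = ([[a10 + a01,a11 + a00 + a02,a12 + a01 + a03,a13 + a02 + a04,a14 + a03],[a00 + a20 + a11,a01 + a21 + a10 + a12,a02 + a22 + a11 + a13,0,0],[0,0,0,0,0],[0,0,0,0,0],[0,0,0,0,0]]) := by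
    simp [pvStepA, pvCell, pvG0, pvG1, pvG2, pvG3, pvG4, pvS0, pvS1, pvS2, pvS3, pvS4]
  have hA13 : pvStepA ((a00::a01::a02::a03::a04::t0)::(a10::a11::a12::a13::a14::t1)::(a20::a21::a22::a23::a24::t2)::(a30::a31::a32::a33::a34::t3)::(a40::a41::a42::a43::a44::t4)::rest) ([[a10 + a01,a11 + a00 + a02,a12 + a01 + a03,a13 + a02 + a04,a14 + a03],[a00 + a20 + a11,a01 + a21 + a10 + a12,a02 + a22 + a11 + a13,0,0],[0,0,0,0,0],[0,0,0,0,0],[0,0,0,0,0]]) 1 3 = ([[a10 + a01,a11 + a00 + a02,a12 + a01 + a03,a13 + a02 + a04,a14 + a03],[a00 + a20 + a11,a01 + a21 + a10 + a12,a02 + a22 + a11 + a13,a03 + a23 + a12 + a14,0],[0,0,0,0,0],[0,0,0,0,0],[0,0,0,0,0]]) := by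
    simp [pvStepA, pvCell, pvG0, pvG1, pvG2, pvG3, pvG4, pvS0, pvS1, pvS2, pvS3, pvS4]
  have hA14 : pvStepA ((a00::a01::a02::a03::a04::t0)::(a10::a11::a12::a13::a14::t1)::(a20::a21::a22::a23::a24::t2)::(a30::a31::a32::a33::a34::t3)::(a40::a41::a42::a43::a44::t4)::rest) ([[a10 + a01,a11 + a00 + a02,a12 + a01 + a03,a13 + a02 + a04,a14 + a03],[a00 + a20 + a11,a01 + a21 + a10 + a12,a02 + a22 + a11 + a13,a03 + a23 + a12 + a14,0],[0,0,0,0,0],[0,0,0,0,0],[0,0,0,0,0]]) 1 4 = ([[a10 + a01,a11 + a00 + a02,a12 + a01 + a03,a13 + a02 + a04,a14 + a03],[a00 + a20 + a11,a01 + a21 + a10 + a12,a02 + a22 + a11 + a13,a03 + a23 + a12 + a14,a04 + a24 + a13],[0,0,0,0,0],[0,0,0,0,0],[0,0,0,0,0]]) := by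
    simp [pvStepA, pvCell, pvG0, pvG1, pvG2, pvG3, pvG4, pvS0, pvS1, pvS2, pvS3, pvS4]
  have hA20 : pvStepA ((a00::a01::a02::a03::a04::t0)::(a10::a11::a12::a13::a14::t1)::(a20::a21::a22::a23::a24::t2)::(a30::a31::a32::a33::a34::t3)::(a40::a41::a42::a43::a44::t4)::rest) ([[a10 + a01,a11 + a00 + a02,a12 + a01 + a03,a13 + a02 + a04,a14 + a03],[a00 + a20 + a11,a01 + a21 + a10 + a12,a02 + a22 + a11 + a13,a03 + a23 + a12 + a14,a04 + a24 + a13],[0,0,0,0,0],[0,0,0,0,0],[0,0,0,0,0]]) 2 0 = ([[a10 + a01,a11 + a00 + a02,a12 + a01 + a03,a13 + a02 + a04,a14 + a03],[a00 + a20 + a11,a01 + a21 + a10 + a12,a02 + a22 + a11 + a13,a03 + a23 + a12 + a14,a04 + a24 + a13],[a10 + a30 + a21,0,0,0,0],[0,0,0,0,0],[0,0,0,0,0]]) := by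
    simp [pvStepA, pvCell, pvG0, pvG1, pvG2, pvG3, pvG4, pvS0, pvS1, pvS2, pvS3, pvS4]
  have hA21 : pvStepA ((a00::a01::a02::a03::a04::t0)::(a10::a11::a12::a13::a14::t1)::(a20::a21::a22::a23::a24::t2)::(a30::a31::a32::a33::a34::t3)::(a40::a41::a42::a43::a44::t4)::rest) ([[a10 + a01,a11 + a00 + a02,a12 + a01 + a03,a13 + a02 + a04,a14 + a03],[a00 + a20 + a11,a01 + a21 + a10 + a12,a02 + a22 + a11 + a13,a03 + a23 + a12 + a14,a04 + a24 + a13],[a10 + a30 + a21,0,0,0,0],[0,0,0,0,0],[0,0,0,0,0]]) 2 1 = ([[a10 + a01,a11 + a00 + a02,a12 + a01 + a03,a13 + a02 + a04,a14 + a03],[a00 + a20 + a11,a01 + a21 + a10 + a12,a02 + a22 + a11 + a13,a03 + a23 + a12 + a14,a04 + a24 + a13],[a10 + a30 + a21,a11 + a31 + a20 + a22,0,0,0],[0,0,0,0,0],[0,0,0,0,0]]) := by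
    simp [pvStepA, pvCell, pvG0, pvG1, pvG2, pvG3, pvG4, pvS0, pvS1, pvS2, pvS3, pvS4]
  have hA22 : pvStepA ((a00::a01::a02::a03::a04::t0)::(a10::a11::a12::a13::a14::t1)::(a20::a21::a22::a23::a24::t2)::(a30::a31::a32::a33::a34::t3)::(a40::a41::a42::a43::a44::t4)::rest) ([[a10 + a01,a11 + a00 + a02,a12 + a01 + a03,a13 + a02 + a04,a14 + a03],[a00 + a20 + a11,a01 + a21 + a10 + a12,a02 + a22 + a11 + a13,a03 + a23 + a12 + a14,a04 + a24 + a13],[a10 + a30 + a21,a11 + a31 + a20 + a22,0,0,0],[0,0,0,0,0],[0,0,0,0,0]]) 2 2 = ([[a10 + a01,a11 + a00 + a02,a12 + a01 + a03,a13 + a02 + a04,a14 + a03],[a00 + a20 + a11,a01 + a21 + a10 + a12,a02 + a22 + a11 + a13,a03 + a23 + a12 + a14,a04 + a24 + a13],[a10 + a30 + a21,a11 + a31 + a20 + a22,a12 + a32 + a21 + a23,0,0],[0,0,0,0,0],[0,0,0,0,0]]) := by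
    simp [pvStepA, pvCell, pvG0, pvG1, pvG2, pvG3, pvG4, pvS0, pvS1, pvS2, pvS3, pvS4]
  have hA23 : pvStepA ((a00::a01::a02::a03::a04::t0)::(a10::a11::a12::a13::a14::t1)::(a20::a21::a22::a23::a24::t2)::(a30::a31::a32::a33::a34::t3)::(a40::a41::a42::a43::a44::t4)::rest) ([[a10 + a01,a11 + a00 + a02,a12 + a01 + a03,a13 + a02 + a04,a14 + a03],[a00 + a20 + a11,a01 + a21 + a10 + a12,a02 + a22 + a11 + a13,a03 + a23 + a12 + a14,a04 + a24 + a13],[a10 + a30 + a21,a11 + a31 + a20 + a22,a12 + a32 + a21 + a23,0,0],[0,0,0,0,0],[0,0,0,0,0]]) 2 3 = ([[a10 + a01,a11 + a00 + a02,a12 + a01 + a03,a13 + a02 + a04,a14 + a03],[a00 + a20 + a11,a01 + a21 + a10 + a12,a02 + a22 + a11 + a13,a03 + a23 + a12 + a14,a04 + a24 + a13],[a10 + a30 + a21,a11 + a31 + a20 + a22,a12 + a32 + a21 + a23,a13 + a33 + a22 + a24,0],[0,0,0,0,0],[0,0,0,0,0]]) := by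
    simp [pvStepA, pvCell, pvG0, pvG1, pvG2, pvG3, pvG4, pvS0, pvS1, pvS2, pvS3, pvS4]
  have hA24 : pvStepA ((a00::a01::a02::a03::a04::t0)::(a10::a11::a12::a13::a14::t1)::(a20::a21::a22::a23::a24::t2)::(a30::a31::a32::a33::a34::t3)::(a40::a41::a42::a43::a44::t4)::rest) ([[a10 + a01,a11 + a00 + a02,a12 + a01 + a03,a13 + a02 + a04,a14 + a03],[a00 + a20 + a11,a01 + a21 + a10 + a12,a02 + a22 + a11 + a13,a03 + a23 + a12 + a14,a04 + a24 + a13],[a10 + a30 + a21,a11 + a31 + a20 + a22,a12 + a32 + a21 + a23,a13 + a33 + a22 + a24,0],[0,0,0,0,0],[0,0,0,0,0]]) 2 4 = ([[a10 + a01,a11 + a00 + a02,a12 + a01 + a03,a13 + a02 + a04,a14 + a03],[a00 + a20 + a11,a01 + a21 + a10 + a12,a02 + a22 + a11 + a13,a03 + a23 + a12 + a14,a04 + a24 + a13],[a10 + a30 + a21,a11 + a31 + a20 + a22,a12 + a32 + a21 + a23,a13 + a33 + a22 + a24,a14 + a34 + a23],[0,0,0,0,0],[0,0,0,0,0]]) :=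 by
    simp [pvStepA, pvCell, pvG0, pvG1, pvG2, pvG3, pvG4, pvS0, pvS1, pvS2, pvS3, pvS4]
  have hA30 : pvStepA ((a00::a01::a02::a03::a04::t0)::(a10::a11::a12::a13::a14::t1)::(a20::a21::a22::a23::a24::t2)::(a30::a31::a32::a33::a34::t3)::(a40::a41::a42::a43::a44::t4)::rest) ([[a10 + a01,a11 + a00 + a02,a12 + a01 + a03,a13 + a02 + a04,a14 + a03],[a00 + a20 + a11,a01 + a21 + a10 + a12,a02 + a22 + a11 + a13,a03 + a23 + a12 + a14,a04 + a24 + a13],[a10 + a30 + a21,a11 + a31 + a20 + a22,a12 + a32 + a21 + a23,a13 + a33 + a22 + a24,a14 + a34 + a23],[0,0,0,0,0],[0,0,0,0,0]]) 3 0 = ([[a10 + a01,a11 + a00 + a02,a12 + a01 + a03,a13 + a02 + a04,a14 + a03],[a00 + a20 + a11,a01 + a21 + a10 + a12,a02 + a22 + a11 + a13,a03 + a23 + a12 + a14,a04 + a24 + a13],[a10 + a30 + a21,a11 + a31 + a20 + a22,a12 + a32 + a21 + a23,a13 + a33 + a22 + a24,a14 + a34 + a23],[a20 + a40 + a31,0,0,0,0],[0,0,0,0,0]])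 := by
    simp [pvStepA, pvCell, pvG0, pvG1, pvG2, pvG3, pvG4, pvS0, pvS1, pvS2, pvS3, pvS4]
  have hA31 : pvStepA ((a00::a01::a02::a03::a04::t0)::(a10::a11::a12::a13::a14::t1)::(a20::a21::a22::a23::a24::t2)::(a30::a31::a32::a33::a34::t3)::(a40::a41::a42::a43::a44::t4)::rest) ([[a10 + a01,a11 + a00 + a02,a12 + a01 + a03,a13 + a02 + a04,a14 + a03],[a00 + a20 + a11,a01 + a21 + a10 + a12,a02 + a22 + a11 + a13,a03 + a23 + a12 + a14,a04 + a24 + a13],[a10 + a30 + a21,a11 + a31 + a20 + a22,a12 + a32 + a21 + a23,a13 + a33 + a22 + a24,a14 + a34 + a23],[a20 + a40 + a31,0,0,0,0],[0,0,0,0,0]]) 3 1 = ([[a10 + a01,a11 + a00 + a02,a12 + a01 + a03,a13 + a02 + a04,a14 + a03],[a00 + a20 + a11,a01 + a21 + a10 + a12,a02 + a22 + a11 + a13,a03 + a23 + a12 + a14,a04 + a24 + a13],[a10 + a30 + a21,a11 + a31 + a20 + a22,a12 + a32 + a21 + a23,a13 + a33 + a22 + a24,a14 + a34 + a23],[a20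 + a40 + a31,a21 + a41 + a30 + a32,0,0,0],[0,0,0,0,0]]) := by
    simp [pvStepA, pvCell, pvG0, pvG1, pvG2, pvG3, pvG4, pvS0, pvS1, pvS2, pvS3, pvS4]
  have hA32 : pvStepA ((a00::a01::a02::a03::a04::t0)::(a10::a11::a12::a13::a14::t1)::(a20::a21::a22::a23::a24::t2)::(a30::a31::a32::a33::a34::t3)::(a40::a41::a42::a43::a44::t4)::rest) ([[a10 + a01,a11 + a00 + a02,a12 + a01 + a03,a13 + a02 + a04,a14 + a03],[a00 + a20 + a11,a01 + a21 + a10 + a12,a02 + a22 + a11 + a13,a03 + a23 + a12 + a14,a04 + a24 + a13],[a10 + a30 + a21,a11 + a31 + a20 + a22,a12 + a32 + a21 + a23,a13 + a33 + a22 + a24,a14 + a34 + a23],[a20 + a40 + a31,a21 + a41 + a30 + a32,0,0,0],[0,0,0,0,0]]) 3 2 = ([[a10 + a01,a11 + a00 + a02,a12 + a01 + a03,a13 + a02 + a04,a14 + a03],[a00 + a20 + a11,a01 + a21 + a10 + a12,a02 + a22 + a11 + a13,a03 + a23 + a12 + a14,a04 + a24 + a13],[a10 + a30 + a21,a11 +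 a31 + a20 + a22,a12 + a32 + a21 + a23,a13 + a33 + a22 + a24,a14 + a34 + a23],[a20 + a40 + a31,a21 + a41 + a30 + a32,a22 + a42 + a31 + a33,0,0],[0,0,0,0,0]]) := by
    simp [pvStepA, pvCell, pvG0, pvG1, pvG2, pvG3, pvG4, pvS0, pvS1, pvS2, pvS3, pvS4]
  have hA33 : pvStepA ((a00::a01::a02::a03::a04::t0)::(a10::a11::a12::a13::a14::t1)::(a20::a21::a22::a23::a24::t2)::(a30::a31::a32::a33::a34::t3)::(a40::a41::a42::a43::a44::t4)::rest) ([[a10 + a01,a11 + a00 + a02,a12 + a01 + a03,a13 + a02 + a04,a14 + a03],[a00 + a20 + a11,a01 + a21 + a10 + a12,a02 + a22 + a11 + a13,a03 + a23 + a12 + a14,a04 + a24 + a13],[a10 + a30 + a21,a11 + a31 + a20 + a22,a12 + a32 + a21 + a23,a13 + a33 + a22 + a24,a14 + a34 + a23],[a20 + a40 + a31,a21 + a41 + a30 + a32,a22 + a42 + a31 + a33,0,0],[0,0,0,0,0]]) 3 3 = ([[a10 + a01,a11 + a00 + a02,a12 + a01 + a03,a13 + a02 + a04,a14 + a03],[a00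 + a20 + a11,a01 + a21 + a10 + a12,a02 + a22 + a11 + a13,a03 + a23 + a12 + a14,a04 + a24 + a13],[a10 + a30 + a21,a11 + a31 + a20 + a22,a12 + a32 + a21 + a23,a13 + a33 + a22 + a24,a14 + a34 + a23],[a20 + a40 + a31,a21 + a41 + a30 + a32,a22 + a42 + a31 + a33,a23 + a43 + a32 + a34,0],[0,0,0,0,0]]) := by
    simp [pvStepA, pvCell, pvG0, pvG1, pvG2, pvG3, pvG4, pvS0, pvS1, pvS2, pvS3, pvS4]
  have hA34 : pvStepA ((a00::a01::a02::a03::a04::t0)::(a10::a11::a12::a13::a14::t1)::(a20::a21::a22::a23::a24::t2)::(a30::a31::a32::a33::a34::t3)::(a40::a41::a42::a43::a44::t4)::rest) ([[a10 + a01,a11 + a00 + a02,a12 + a01 + a03,a13 + a02 + a04,a14 + a03],[a00 + a20 + a11,a01 + a21 + a10 + a12,a02 + a22 + a11 + a13,a03 + a23 + a12 + a14,a04 + a24 + a13],[a10 + a30 + a21,a11 + a31 + a20 + a22,a12 + a32 + a21 + a23,a13 + a33 + a22 + a24,a14 + a34 + a23],[a20 + a40 + a31,a21 + a41 + a30 +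 a32,a22 + a42 + a31 + a33,a23 + a43 + a32 + a34,0],[0,0,0,0,0]]) 3 4 = ([[a10 + a01,a11 + a00 + a02,a12 + a01 + a03,a13 + a02 + a04,a14 + a03],[a00 + a20 + a11,a01 + a21 + a10 + a12,a02 + a22 + a11 + a13,a03 + a23 + a12 + a14,a04 + a24 + a13],[a10 + a30 + a21,a11 + a31 + a20 + a22,a12 + a32 + a21 + a23,a13 + a33 + a22 + a24,a14 + a34 + a23],[a20 + a40 + a31,a21 + a41 + a30 + a32,a22 + a42 + a31 + a33,a23 + a43 + a32 + a34,a24 + a44 + a33],[0,0,0,0,0]]) := by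
    simp [pvStepA, pvCell, pvG0, pvG1, pvG2, pvG3, pvG4, pvS0, pvS1, pvS2, pvS3, pvS4]
  have hA40 : pvStepA ((a00::a01::a02::a03::a04::t0)::(a10::a11::a12::a13::a14::t1)::(a20::a21::a22::a23::a24::t2)::(a30::a31::a32::a33::a34::t3)::(a40::a41::a42::a43::a44::t4)::rest) ([[a10 + a01,a11 + a00 + a02,a12 + a01 + a03,a13 + a02 + a04,a14 + a03],[a00 + a20 + a11,a01 + a21 + a10 + a12,a02 + a22 + a11 + a13,a03 + a23 + a12 + a14,a04 + a24 + a13],[a10 + a30 + a21,a11 + a31 + a20 + a22,a12 + a32 + a21 + a23,a13 + a33 + a22 + a24,a14 + a34 + a23],[a20 + a40 + a31,a21 + a41 + a30 + a32,a22 + a42 + a31 + a33,a23 + a43 + a32 + a34,a24 + a44 + a33],[0,0,0,0,0]]) 4 0 = ([[a10 + a01,a11 + a00 + a02,a12 + a01 + a03,a13 + a02 + a04,a14 + a03],[a00 + a20 + a11,a01 + a21 + a10 + a12,a02 + a22 + a11 + a13,a03 + a23 + a12 + a14,a04 + a24 + a13],[a10 + a30 + a21,a11 + a31 + a20 + a22,a12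 + a32 + a21 + a23,a13 + a33 + a22 + a24,a14 + a34 + a23],[a20 + a40 + a31,a21 + a41 + a30 + a32,a22 + a42 + a31 + a33,a23 + a43 + a32 + a34,a24 + a44 + a33],[a30 + a41,0,0,0,0]]) := by
    simp [pvStepA, pvCell, pvG0, pvG1, pvG2, pvG3, pvG4, pvS0, pvS1, pvS2, pvS3, pvS4]
  have hA41 : pvStepA ((a00::a01::a02::a03::a04::t0)::(a10::a11::a12::a13::a14::t1)::(a20::a21::a22::a23::a24::t2)::(a30::a31::a32::a33::a34::t3)::(a40::a41::a42::a43::a44::t4)::rest) ([[a10 + a01,a11 + a00 + a02,a12 + a01 + a03,a13 + a02 + a04,a14 + a03],[a00 + a20 + a11,a01 + a21 + a10 + a12,a02 + a22 + a11 + a13,a03 + a23 + a12 + a14,a04 + a24 + a13],[a10 + a30 + a21,a11 + a31 + a20 + a22,a12 + a32 + a21 + a23,a13 + a33 + a22 + a24,a14 + a34 + a23],[a20 + a40 + a31,a21 + a41 + a30 + a32,a22 + a42 + a31 + a33,a23 + a43 + a32 + a34,a24 + a44 + a33],[a30 + a41,0,0,0,0]]) 4 1 = ([[a10 + a01,a11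 + a00 + a02,a12 + a01 + a03,a13 + a02 + a04,a14 + a03],[a00 + a20 + a11,a01 + a21 + a10 + a12,a02 + a22 + a11 + a13,a03 + a23 + a12 + a14,a04 + a24 + a13],[a10 + a30 + a21,a11 + a31 + a20 + a22,a12 + a32 + a21 + a23,a13 + a33 + a22 + a24,a14 + a34 + a23],[a20 + a40 + a31,a21 + a41 + a30 + a32,a22 + a42 + a31 + a33,a23 + a43 + a32 + a34,a24 + a44 + a33],[a30 + a41,a31 + a40 + a42,0,0,0]]) := by
    simp [pvStepA, pvCell, pvG0, pvG1, pvG2, pvG3, pvG4, pvS0, pvS1, pvS2, pvS3, pvS4]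
  have hA42 : pvStepA ((a00::a01::a02::a03::a04::t0)::(a10::a11::a12::a13::a14::t1)::(a20::a21::a22::a23::a24::t2)::(a30::a31::a32::a33::a34::t3)::(a40::a41::a42::a43::a44::t4)::rest) ([[a10 + a01,a11 + a00 + a02,a12 + a01 + a03,a13 + a02 + a04,a14 + a03],[a00 + a20 + a11,a01 + a21 + a10 + a12,a02 + a22 + a11 + a13,a03 + a23 + a12 + a14,a04 + a24 + a13],[a10 + a30 + a21,a11 + a31 + a20 + a22,a12 + a32 + a21 + a23,a13 + a33 + a22 + a24,a14 + a34 + a23],[a20 + a40 + a31,a21 + a41 + a30 + a32,a22 + a42 + a31 + a33,a23 + a43 + a32 + a34,a24 + a44 + a33],[a30 + a41,a31 + a40 + a42,0,0,0]]) 4 2 = ([[a10 + a01,a11 + a00 + a02,a12 + a01 + a03,a13 + a02 + a04,a14 + a03],[a00 + a20 + a11,a01 + a21 + a10 + a12,a02 + a22 + a11 + a13,a03 + a23 + a12 + a14,a04 + a24 + a13],[a10 + a30 + a21,a11 + a31 + a20 + a22,a12 + a32 + a21 + a23,a13 + a33 + a22 + a24,a14 + a34 + a23],[a20 + a40 + a31,a21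 + a41 + a30 + a32,a22 + a42 + a31 + a33,a23 + a43 + a32 + a34,a24 + a44 + a33],[a30 + a41,a31 + a40 + a42,a32 + a41 + a43,0,0]]) := by
    simp [pvStepA, pvCell, pvG0, pvG1, pvG2, pvG3, pvG4, pvS0, pvS1, pvS2, pvS3, pvS4]
  have hA43 : pvStepA ((a00::a01::a02::a03::a04::t0)::(a10::a11::a12::a13::a14::t1)::(a20::a21::a22::a23::a24::t2)::(a30::a31::a32::a33::a34::t3)::(a40::a41::a42::a43::a44::t4)::rest) ([[a10 + a01,a11 + a00 + a02,a12 + a01 + a03,a13 + a02 + a04,a14 + a03],[a00 + a20 + a11,a01 + a21 + a10 + a12,a02 + a22 + a11 + a13,a03 + a23 + a12 + a14,a04 + a24 + a13],[a10 + a30 + a21,a11 + a31 + a20 + a22,a12 + a32 + a21 + a23,a13 + a33 + a22 + a24,a14 + a34 + a23],[a20 + a40 + a31,a21 + a41 + a30 + a32,a22 + a42 + a31 + a33,a23 + a43 + a32 + a34,a24 + a44 + a33],[a30 + a41,a31 + a40 + a42,a32 + a41 + a43,0,0]]) 4 3 = ([[a10 + a01,a11 + a00 + a02,a12 + a01 +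 a03,a13 + a02 + a04,a14 + a03],[a00 + a20 + a11,a01 + a21 + a10 + a12,a02 + a22 + a11 + a13,a03 + a23 + a12 + a14,a04 + a24 + a13],[a10 + a30 + a21,a11 + a31 + a20 + a22,a12 + a32 + a21 + a23,a13 + a33 + a22 + a24,a14 + a34 + a23],[a20 + a40 + a31,a21 + a41 + a30 + a32,a22 + a42 + a31 + a33,a23 + a43 + a32 + a34,a24 + a44 + a33],[a30 + a41,a31 + a40 + a42,a32 + a41 + a43,a33 + a42 + a44,0]]) := by
    simp [pvStepA, pvCell, pvG0, pvG1, pvG2, pvG3, pvG4, pvS0, pvS1, pvS2, pvS3, pvS4]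
  have hA44 : pvStepA ((a00::a01::a02::a03::a04::t0)::(a10::a11::a12::a13::a14::t1)::(a20::a21::a22::a23::a24::t2)::(a30::a31::a32::a33::a34::t3)::(a40::a41::a42::a43::a44::t4)::rest) ([[a10 + a01,a11 + a00 + a02,a12 + a01 + a03,a13 + a02 + a04,a14 + a03],[a00 + a20 + a11,a01 + a21 + a10 + a12,a02 + a22 + a11 + a13,a03 + a23 + a12 + a14,a04 + a24 + a13],[a10 + a30 + a21,a11 + a31 + a20 + a22,a12 + a32 + a21 + a23,a13 + a33 + a22 + a24,a14 + a34 + a23],[a20 + a40 + a31,a21 + a41 + a30 + a32,a22 + a42 + a31 + a33,a23 + a43 + a32 + a34,a24 + a44 + a33],[a30 + a41,a31 + a40 + a42,a32 + a41 + a43,a33 + a42 + a44,0]]) 4 4 = ([[a10 + a01,a11 + a00 + a02,a12 + a01 + a03,a13 + a02 + a04,a14 + a03],[a00 + a20 + a11,a01 + a21 + a10 + a12,a02 + a22 + a11 + a13,a03 + a23 + a12 + a14,a04 + a24 + a13],[a10 + a30 + a21,a11 + a31 + a20 + a22,a12 + a32 + a21 + a23,a13 + a33 + a22 + a24,a14 +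 a34 + a23],[a20 + a40 + a31,a21 + a41 + a30 + a32,a22 + a42 + a31 + a33,a23 + a43 + a32 + a34,a24 + a44 + a33],[a30 + a41,a31 + a40 + a42,a32 + a41 + a43,a33 + a42 + a44,a34 + a43]]) := by
    simp [pvStepA, pvCell, pvG0, pvG1, pvG2, pvG3, pvG4, pvS0, pvS1, pvS2, pvS3, pvS4]
  have hrange : PySem.List.pyRange 0 5 1 = [0,1,2,3,4] := by decide
  have hB : neighbor_score_alt ((a00::a01::a02::a03::a04::t0)::(a10::a11::a12::a13::a14::t1)::(a20::a21::a22::a23::a24::t2)::(a30::a31::a32::a33::a34::t3)::(a40::a41::a42::a43::a44::t4)::rest) =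
      [[a01 + 0 + (0 + a10), a02 + a00 + (0 + a11), a03 + a01 + (0 + a12), a04 + a02 + (0 + a13), 0 + a03 + (0 + a14)],
       [a11 + 0 + (a00 + a20), a12 + a10 + (a01 + a21), a13 + a11 + (a02 + a22), a14 + a12 + (a03 + a23), 0 + a13 + (a04 + a24)],
       [a21 + 0 + (a10 + a30), a22 + a20 + (a11 + a31), a23 + a21 + (a12 + a32), a24 + a22 + (a13 + a33), 0 + a23 + (a14 + a34)],
       [a31 + 0 + (a20 + a40), a32 + a30 + (a21 + a41), a33 + a31 + (a22 + a42), a34 + a32 + (a23 + a43), 0 + a33 + (a24 + a44)],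
       [a41 + 0 + (a30 + 0), a42 + a40 + (a31 + 0), a43 + a41 + (a32 + 0), a44 + a42 + (a33 + 0), 0 + a43 + (a34 + 0)]] := by
    simp [neighbor_score_alt, pvAddv, PySem.List.slice, List.zipWith, hrange,
      pvG0, pvG1, pvG2, pvG3, pvG4]
  have hns0 : (List.range 5).map (fun _ => List.replicate 5 (0:Int)) = [[0,0,0,0,0],[0,0,0,0,0],[0,0,0,0,0],[0,0,0,0,0],[0,0,0,0,0]] := by decide
  simp only [neighbor_score, hrange, hns0, List.foldl_cons, List.foldl_nil]
  rw [hA00, hA01, hA02, hA03, hA04, hA10, hA11, hA12, hA13, hA14, hA20, hA21, hA22, hA23, hA24, hA30, hA31, hA32, hA33, hA34, hA40, hA41, hA42, hA43, hA44, hB]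
  simp only [List.cons.injEq, and_true]
  omega

-- ===== VERDICT (by name: the statement is the Claim_ definition above) =====
theorem neighbor_score_spec : Claim_equal_neighbor_score := by
  intro grid _ hpre
  obtain ⟨hlen, hrow⟩ := hpre
  obtain ⟨r0,r1,r2,r3,r4,rest,rfl⟩ := pvSplit5 grid hlen
  obtain ⟨a00,a01,a02,a03,a04,t0,rfl⟩ := pvSplit5 r0 (hrow r0 (by simp))
  obtain ⟨a10,a11,a12,a13,a14,t1,rfl⟩ := pvSplit5 r1 (hrow r1 (by simp))
  obtain ⟨a20,a21,a22,a23,a24,t2,rfl⟩ := pvSplit5 r2 (hrow r2 (by simp))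
  obtain ⟨a30,a31,a32,a33,a34,t3,rfl⟩ := pvSplit5 r3 (hrow r3 (by simp))
  obtain ⟨a40,a41,a42,a43,a44,t4,rfl⟩ := pvSplit5 r4 (hrow r4 (by simp))
  unfold Spec_neighbor_score
  exact pvMain a00 a01 a02 a03 a04 a10 a11 a12 a13 a14 a20 a21 a22 a23 a24
    a30 a31 a32 a33 a34 a40 a41 a42 a43 a44 t0 t1 t2 t3 t4 rest
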